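-- pv_equiv track=rewrite | github.com/pymcp/game4 | tools/gen_hires_sheet.py | _resolve_slot
-- ===== SOURCE A (Python) =====
-- def _resolve_slot(items, item_id, visited=None):
--     """Walk the parent chain in items.json to find the effective slot."""
--     if visited is None:
--         visited = set()
--     if item_id in visited:
--         return "none"
--     visited.add(item_id)
--     data = items.get(item_id, {})
--     if "slot" in data:
--         return data["slot"]
--     parent = data.get("parent", "")
--     if parent:
--         return _resolve_slot(items, parent, visited)
--     return "none"
-- ===== SOURCE B (Python) =====
-- def _resolve_slot(items, item_id, visited=None):
--     """Two-phase: collect the parent chain first, then scan it for the first slot."""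
--     if visited is None:
--         visited = set()
--     chain = []
--     cur = item_id
--     while cur not in visited:
--         visited.add(cur)
--         chain.append(cur)
--         cur = items.get(cur, {}).get("parent", "")
--         if not cur:
--             break
--     for node in chain:
--         data = items.get(node, {})
--         if "slot" in data:
--             return data["slot"]
--     return "none"
-- ===== Notes on version B (the rewrite author's own statement) =====
-- stated objective: alternative
-- what changed: Replaces the single recursive walk (check-slot-then-recurse) with two staged passes: an iterative loop that first materialises the whole parent chain as a list, then a linear scan of that list for the first id carrying a slot.
import Mathlib
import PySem

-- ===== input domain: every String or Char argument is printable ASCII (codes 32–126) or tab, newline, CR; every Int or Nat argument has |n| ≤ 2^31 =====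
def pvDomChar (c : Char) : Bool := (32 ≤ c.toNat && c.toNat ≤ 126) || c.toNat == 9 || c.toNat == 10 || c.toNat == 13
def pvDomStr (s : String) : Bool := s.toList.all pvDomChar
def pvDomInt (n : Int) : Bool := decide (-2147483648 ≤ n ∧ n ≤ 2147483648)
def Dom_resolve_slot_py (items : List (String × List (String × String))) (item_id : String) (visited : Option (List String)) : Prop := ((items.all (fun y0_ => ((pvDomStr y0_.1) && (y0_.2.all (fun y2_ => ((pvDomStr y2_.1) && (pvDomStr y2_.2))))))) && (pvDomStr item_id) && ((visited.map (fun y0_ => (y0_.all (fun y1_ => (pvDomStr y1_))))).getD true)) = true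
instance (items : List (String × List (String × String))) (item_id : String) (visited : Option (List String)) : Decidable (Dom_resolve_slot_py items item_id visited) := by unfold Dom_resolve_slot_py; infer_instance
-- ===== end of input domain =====

-- B stages A's single recursive walk into two passes: materialise the parent chain as a
-- list, then scan it for the first slot. Return-value equivalence only: both Pythons
-- mutate a caller-passed `visited` set, and B may add ids past the slot-bearing node.

-- ===== PORT A =====
-- recursive helper for A; fuel items.length+1 is a totality guard only: every
-- recursive call goes to a fresh (unvisited) key of items, so fuel never runs out.
def pvAGo (items : List (String × List (String × String))) : Nat → String → List String → String
  | 0, _, _ => "none"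
  | Nat.succ fuel, item_id, visited =>
    if PySem.Set.contains visited item_id then "none"
    else
      let visited := PySem.Set.add visited item_id
      let data : PySem.Dict String String :=
        PySem.Dict.mk (PySem.Dict.getD (PySem.Dict.mk items) item_id [])
      if PySem.Dict.contains data "slot" then (PySem.Dict.get? data "slot").getD ""
      else
        let parent := PySem.Dict.getD data "parent" ""
        if parent ≠ "" then pvAGo items fuel parent visited
        else "none"

def resolve_slot_py (items : List (String × List (String × String))) (item_id : String) (visited : Option (List String)) : String :=
  pvAGo items (items.length + 1) item_id (visited.getD [])

-- ===== PORT B =====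
-- phase 1 of Source B: the while-loop collecting the parent chain into a list
-- (same fuel guard; the chain has at most items.length + 1 nodes).
def pvChain (items : List (String × List (String × String))) : Nat → String → List String → List String
  | 0, _, _ => []
  | Nat.succ fuel, cur, visited =>
    if PySem.Set.contains visited cur then []
    else
      cur ::
        (let next := PySem.Dict.getD
            (PySem.Dict.mk (PySem.Dict.getD (PySem.Dict.mk items) cur []))
            "parent" ""
         if next = "" then [] else pvChain items fuel next (PySem.Set.add visited cur))

-- phase 2 of Source B: the for-loop returning the first chain node whose data has "slot".
def resolve_slot_py_alt (items : List (String × List (String × String))) (item_id : String) (visited : Option (List String)) : String :=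
  let chain := pvChain items (items.length + 1) item_id (visited.getD [])
  (chain.findSome? (fun node =>
      PySem.Dict.get? (PySem.Dict.mk (PySem.Dict.getD (PySem.Dict.mk items) node [])) "slot")).getD "none"

-- ===== PRECONDITION & SPEC =====
def Spec_resolve_slot_py (items : List (String × List (String × String))) (item_id : String) (visited : Option (List String)) (out : String) : Prop := out = resolve_slot_py_alt items item_id visited
instance (items : List (String × List (String × String))) (item_id : String) (visited : Option (List String)) (out : String) : Decidable (Spec_resolve_slot_py items item_id visited out) := by unfold Spec_resolve_slot_py; infer_instance

-- ===== CLAIM (what is proved, stated in full; the proofs are below) =====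
def Claim_equal_resolve_slot_py : Prop := ∀ (items : List (String × List (String × String))) (item_id : String) (visited : Option (List String)), Dom_resolve_slot_py items item_id visited → Spec_resolve_slot_py items item_id visited (resolve_slot_py items item_id visited)

-- ===== LEMMAS AND PROOFS =====
-- Key invariant: for ANY fuel, A's recursive walk equals "scan B's chain for a slot":
-- A stops at the first slot-bearing node, and B's chain is exactly the nodes A visits
-- (possibly extended past the slot node, which the scan ignores).
theorem pvGo_eq_chain (items : List (String × List (String × String))) :
    ∀ (fuel : Nat) (item_id : String) (visited : List String),
      pvAGo items fuel item_id visited =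
        ((pvChain items fuel item_id visited).findSome? (fun node =>
            PySem.Dict.get? (PySem.Dict.mk (PySem.Dict.getD (PySem.Dict.mk items) node [])) "slot")).getD "none" := by
  intro fuel
  induction fuel with
  | zero => intro _ _; rfl
  | succ n ih =>
    intro item_id visited
    simp only [pvAGo, pvChain]
    by_cases hv : PySem.Set.contains visited item_id
    · rw [if_pos hv, if_pos hv]; rfl
    · rw [if_neg hv, if_neg hv]
      rcases hs : PySem.Dict.get? (PySem.Dict.mk (PySem.Dict.getD (PySem.Dict.mk items) item_id [])) "slot" with _ | s
      · have hc : PySem.Dict.contains (PySem.Dict.mk (PySem.Dict.getD (PySem.Dict.mk items) item_id [])) "slot" = false := by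
          rw [PySem.Dict.contains_eq_isSome_get?, hs]; rfl
        rw [hc]
        simp only [Bool.false_eq_true, if_false]
        by_cases hp : PySem.Dict.getD (PySem.Dict.mk (PySem.Dict.getD (PySem.Dict.mk items) item_id [])) "parent" "" = ""
        · simp [hp, List.findSome?, hs]
        · simp only [hp, ne_eq, not_false_eq_true, if_true, List.findSome?, hs]
          exact ih _ _
      · have hc : PySem.Dict.contains (PySem.Dict.mk (PySem.Dict.getD (PySem.Dict.mk items) item_id [])) "slot" = true := by
          rw [PySem.Dict.contains_eq_isSome_get?, hs]; rfl
        rw [hc]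
        simp [List.findSome?, hs]

-- ===== VERDICT (by name: the statement is the Claim_ definition above) =====
theorem resolve_slot_py_spec : Claim_equal_resolve_slot_py := by
  intro items item_id visited _
  unfold Spec_resolve_slot_py resolve_slot_py resolve_slot_py_alt
  exact pvGo_eq_chain items _ _ _
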